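-- pv_equiv track=rewrite | github.com/Hardfde/Derivative-calculator | derivative.py | minus_index_calc
-- ===== SOURCE A (Python) =====
-- from collections import defaultdict
--
-- def minus_index_calc(string):
--     minus_index = defaultdict(list)
--     a = 0
--     for i in range(len(string)):
--         if string[i] == '(':
--             a += 1
--         elif string[i] == ')':
--             a -= 1
--         elif string[i] == '-':
--             for d in range(a, -1, -1):
--                 minus_index[d].append(i)
--     return minus_index
-- ===== SOURCE B (Python) =====
-- from collections import defaultdict
--
-- def minus_index_calc(string):
--     depth = 0
--     minuses = []
--     for i, c in enumerate(string):
--         if c == '(':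
--             depth += 1
--         elif c == ')':
--             depth -= 1
--         elif c == '-':
--             minuses.append((i, depth))
--     levels = dict.fromkeys(lvl for _, d in minuses for lvl in range(d, -1, -1))
--     result = defaultdict(list)
--     for lvl in levels:
--         result[lvl] = [j for j, d in minuses if d >= lvl]
--     return result
-- ===== Notes on version B (the rewrite author's own statement) =====
-- stated objective: alternative
-- what changed: A appends the index to every dict level 0..depth inside the character loop; B does one pass collecting (index, depth) of each minus, derives the distinct touched levels with dict.fromkeys over each minus's level range, and builds each level's index list once by filtering, removing the per-character inner dict-append loop.
import Mathlib
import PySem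

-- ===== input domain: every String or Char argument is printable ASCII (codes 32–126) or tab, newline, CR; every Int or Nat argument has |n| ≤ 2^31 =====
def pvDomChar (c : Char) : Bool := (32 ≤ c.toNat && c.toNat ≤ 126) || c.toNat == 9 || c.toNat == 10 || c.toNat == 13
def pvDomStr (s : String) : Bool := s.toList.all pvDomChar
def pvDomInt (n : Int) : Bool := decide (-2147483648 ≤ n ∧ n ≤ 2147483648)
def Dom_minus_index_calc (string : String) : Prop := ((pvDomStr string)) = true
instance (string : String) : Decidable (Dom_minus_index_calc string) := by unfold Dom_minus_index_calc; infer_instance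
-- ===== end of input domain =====

-- B replaces A's per-minus inner dict-append loop by a collect-then-build decomposition (scan once for minus positions/depths, then fill each level once); return values are identical (alternative decomposition, no speed claim).

-- ===== PORT A =====
-- inner loop 'for d in range(a, -1, -1): minus_index[d].append(i)' (defaultdict access = getD [] then overwrite in place / append new key)
def pvInnerA (d0 : PySem.Dict Int (List Int)) (i a : Int) : PySem.Dict Int (List Int) :=
  (PySem.List.pyRange a (-1) (-1)).foldl (fun dct d => dct.insert d (dct.getD d [] ++ [i])) d0

def minus_index_calc (string : String) : List (Int × List Int) :=
  ((PySem.List.enumerate string.toList 0).foldl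
    (fun (st : PySem.Dict Int (List Int) × Int) p =>
      if p.2 = '(' then (st.1, st.2 + 1)
      else if p.2 = ')' then (st.1, st.2 - 1)
      else if p.2 = '-' then (pvInnerA st.1 p.1 st.2, st.2)
      else st) (PySem.Dict.empty, 0)).1.items

-- ===== PORT B =====
-- 'dict.fromkeys(gen)' over the generator of each minus's levels = PySem.List.dedup of the flatMap
def minus_index_calc_alt (string : String) : List (Int × List Int) :=
  let ms := ((PySem.List.enumerate string.toList 0).foldl
    (fun (st : Int × List (Int × Int)) p =>
      if p.2 = '(' then (st.1 + 1, st.2)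
      else if p.2 = ')' then (st.1 - 1, st.2)
      else if p.2 = '-' then (st.1, st.2 ++ [(p.1, st.1)])
      else st) (0, [])).2
  let levels := PySem.List.dedup (ms.flatMap (fun p => PySem.List.pyRange p.2 (-1) (-1)))
  (levels.foldl (fun (d : PySem.Dict Int (List Int)) k =>
      d.insert k ((ms.filter (fun p => decide (k ≤ p.2))).map Prod.fst)) PySem.Dict.empty).items

-- ===== PRECONDITION & SPEC =====
def Spec_minus_index_calc (string : String) (out : List (Int × List Int)) : Prop := out = minus_index_calc_alt string
instance (string : String) (out : List (Int × List Int)) : Decidable (Spec_minus_index_calc string out) := by unfold Spec_minus_index_calc; infer_instance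

-- ===== CLAIM (what is proved, stated in full; the proofs are below) =====
def Claim_equal_minus_index_calc : Prop := ∀ (string : String), Dom_minus_index_calc string → Spec_minus_index_calc string (minus_index_calc string)

-- ===== LEMMAS AND PROOFS =====

-- the (index, depth) pairs of the minus signs, with the running paren depth
def pvCollect : List (Int × Char) → Int → List (Int × Int)
  | [], _ => []
  | p :: l, a =>
    if p.2 = '(' then pvCollect l (a + 1)
    else if p.2 = ')' then pvCollect l (a - 1)
    else if p.2 = '-' then (p.1, a) :: pvCollect l a
    else pvCollect l a

-- keys in first-touch order, characterised by a running max: km.1 = the key list, km.2 = max depth so far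
def pvKM (ms : List (Int × Int)) : List Int × Int :=
  ms.foldl (fun (km : List Int × Int) p =>
      if km.2 < p.2 then (km.1 ++ PySem.List.pyRange p.2 km.2 (-1), p.2) else km) ([], -1)

def pvVals (ms : List (Int × Int)) (k : Int) : List Int :=
  (ms.filter (fun p => decide (k ≤ p.2))).map Prod.fst

def pvG (ms : List (Int × Int)) : PySem.Dict Int (List Int) :=
  ms.foldl (fun dd p => pvInnerA dd p.1 p.2) PySem.Dict.empty

def pvH (ms : List (Int × Int)) : PySem.Dict Int (List Int) :=
  (pvKM ms).1.foldl (fun d k => d.insert k (pvVals ms k)) PySem.Dict.empty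

lemma pvRange_neg_one (a b : Int) :
    PySem.List.pyRange a b (-1) = (List.range (a - b).toNat).map (fun k : Nat => a - (k : Int)) := by
  unfold PySem.List.pyRange
  norm_num
  split_ifs with h
  · apply List.map_congr_left; intro k _; ring
  · have : (a - b).toNat = 0 := by omega
    simp [this]

lemma pvMem_range_neg_one {a b x : Int} :
    x ∈ PySem.List.pyRange a b (-1) ↔ b < x ∧ x ≤ a := by
  rw [pvRange_neg_one]
  simp only [List.mem_map, List.mem_range]
  constructor
  · rintro ⟨k, hk, rfl⟩; omega
  · intro h
    exact ⟨(a - x).toNat, by omega, by omega⟩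

lemma pvRange_neg_one_split {a b c : Int} (h1 : b ≤ c) (h2 : c ≤ a) :
    PySem.List.pyRange a b (-1) = PySem.List.pyRange a c (-1) ++ PySem.List.pyRange c b (-1) := by
  rw [pvRange_neg_one, pvRange_neg_one, pvRange_neg_one]
  have hn : (a - b).toNat = (a - c).toNat + (c - b).toNat := by omega
  rw [hn, List.range_add, List.map_append, List.map_map]
  congr 1
  apply List.map_congr_left
  intro k hk
  rw [List.mem_range] at hk
  simp only [Function.comp]
  push_cast
  omega

lemma pvNodup_range_neg_one (a b : Int) : (PySem.List.pyRange a b (-1)).Nodup := by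
  rw [pvRange_neg_one]
  apply List.Nodup.map
  · intro x y h; dsimp only at h; omega
  · exact List.nodup_range

lemma pvKM_snoc (ms : List (Int × Int)) (p : Int × Int) :
    pvKM (ms ++ [p]) =
      if (pvKM ms).2 < p.2 then ((pvKM ms).1 ++ PySem.List.pyRange p.2 (pvKM ms).2 (-1), p.2)
      else pvKM ms := by
  unfold pvKM
  rw [List.foldl_append]
  rfl

lemma pvKM_inv (ms : List (Int × Int)) :
    (-1 ≤ (pvKM ms).2) ∧ (∀ p ∈ ms, p.2 ≤ (pvKM ms).2) ∧
      (∀ k, k ∈ (pvKM ms).1 ↔ 0 ≤ k ∧ k ≤ (pvKM ms).2) ∧ (pvKM ms).1.Nodup := by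
  induction ms using List.reverseRecOn with
  | nil =>
      refine ⟨by simp [pvKM], by simp, by simp [pvKM]; omega, by simp [pvKM]⟩
  | append_singleton ms p ih =>
    obtain ⟨h1, h2, h3, h4⟩ := ih
    rw [pvKM_snoc]
    split_ifs with hlt
    · refine ⟨by simp; omega, ?_, ?_, ?_⟩
      · intro q hq
        rcases List.mem_append.1 hq with h | h
        · have := h2 q h; simp; omega
        · simp at h; simp [h]
      · intro k
        simp only [List.mem_append, h3, pvMem_range_neg_one]
        omega
      · refine List.Nodup.append h4 (pvNodup_range_neg_one _ _) ?_
        intro x hx hx2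
        rw [h3] at hx
        rw [pvMem_range_neg_one] at hx2
        omega
    · refine ⟨h1, ?_, h3, h4⟩
      intro q hq
      rcases List.mem_append.1 hq with h | h
      · exact h2 q h
      · simp at h; rw [h]; omega

-- folding Set.add over elements already present leaves the set unchanged
lemma pvFoldlAdd_mem (L : List Int) : ∀ (K : PySem.Set Int), (∀ x ∈ L, x ∈ K) →
    L.foldl PySem.Set.add K = K := by
  induction L with
  | nil => intro K _; rfl
  | cons x L ih =>
    intro K h
    have hx : x ∈ K := h x (by simp)
    have : PySem.Set.add K x = K := by
      simp [PySem.Set.add, PySem.Set.contains, hx]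
    simp only [List.foldl_cons, this]
    exact ih K (fun y hy => h y (by simp [hy]))

-- folding Set.add over fresh, duplicate-free elements appends them
lemma pvFoldlAdd_new (L : List Int) : ∀ (K : PySem.Set Int), L.Nodup → (∀ x ∈ L, x ∉ K) →
    L.foldl PySem.Set.add K = K ++ L := by
  induction L with
  | nil => intro K _ _; simp
  | cons x L ih =>
    intro K hnd h
    obtain ⟨hx, hnd'⟩ := List.nodup_cons.1 hnd
    have hxK : x ∉ K := h x (by simp)
    have hadd : PySem.Set.add K x = K ++ [x] := by
      simp [PySem.Set.add, PySem.Set.contains, hxK]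
    simp only [List.foldl_cons, hadd]
    rw [ih (K ++ [x]) hnd']
    · simp
    · intro y hy
      simp only [List.mem_append, List.mem_singleton]
      rintro (hyK | rfl)
      · exact h y (by simp [hy]) hyK
      · exact hx hy

-- the first-occurrence dedup of the concatenated level ranges is exactly the running-max key list
lemma pvDedup_eq (ms : List (Int × Int)) :
    PySem.List.dedup (ms.flatMap (fun p => PySem.List.pyRange p.2 (-1) (-1))) = (pvKM ms).1 := by
  rw [PySem.List.dedup_eq_ofList, PySem.Set.ofList_eq_foldl]
  induction ms using List.reverseRecOn with
  | nil => rfl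
  | append_singleton ms p ih =>
    obtain ⟨h1, h2, h3, h4⟩ := pvKM_inv ms
    rw [List.flatMap_append, List.foldl_append, ih]
    simp only [List.flatMap_cons, List.flatMap_nil, List.append_nil]
    rw [pvKM_snoc]
    split_ifs with hlt
    · rw [pvRange_neg_one_split (b := -1) (c := (pvKM ms).2) h1 (le_of_lt hlt),
        List.foldl_append,
        pvFoldlAdd_new (PySem.List.pyRange p.2 (pvKM ms).2 (-1)) (pvKM ms).1
          (pvNodup_range_neg_one _ _)
          (fun x hx hxK => by
            rw [pvMem_range_neg_one] at hx
            have := (h3 x).1 hxK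
            omega)]
      exact pvFoldlAdd_mem _ _ (fun x hx => by
        rw [pvMem_range_neg_one] at hx
        have hxK : x ∈ (pvKM ms).1 := (h3 x).2 ⟨by omega, by omega⟩
        simp [hxK])
    · exact pvFoldlAdd_mem _ _ (fun x hx => by
        rw [pvMem_range_neg_one] at hx
        exact (h3 x).2 ⟨by omega, by omega⟩)

lemma pvInsertLoop_items (ks : List Int) (i : Int) :
    ∀ (dct : PySem.Dict Int (List Int)), ks.Nodup → dct.keys.Nodup →
    (ks.foldl (fun d k => d.insert k (d.getD k [] ++ [i])) dct).items
      = dct.items.map (fun q => if q.1 ∈ ks then (q.1, q.2 ++ [i]) else q)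
        ++ (ks.filter (fun k => !dct.contains k)).map (fun k => (k, [i])) := by
  induction ks with
  | nil => intro dct _ _; simp
  | cons k ks ih =>
    intro dct hnd hkeys
    obtain ⟨hknotin, hks⟩ := List.nodup_cons.1 hnd
    simp only [List.foldl_cons]
    rw [ih (dct.insert k (dct.getD k [] ++ [i])) hks (PySem.Dict.nodup_keys_insert _ _ _ hkeys)]
    have hfilter : ks.filter (fun x => !(dct.insert k (dct.getD k [] ++ [i])).contains x)
        = ks.filter (fun x => !dct.contains x) := by
      apply List.filter_congr
      intro x hx
      have hxk : (x == k) = false := by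
        simp only [beq_eq_false_iff_ne]
        intro h; exact hknotin (h ▸ hx)
      rw [PySem.Dict.contains_insert, hxk, Bool.false_or]
    rw [hfilter]
    by_cases hc : dct.contains k = true
    · rw [PySem.Dict.items_insert_of_contains _ _ hc, List.map_map,
        List.filter_cons_of_neg (by simp [hc])]
      congr 1
      apply List.map_congr_left
      intro q hq
      by_cases hqk : q.1 = k
      · have hq' : (k, q.2) ∈ dct.items := by
          rw [← hqk]
          exact (Prod.mk.eta (p := q)) ▸ hq
        have hq2 : dct.getD k [] = q.2 := PySem.Dict.getD_of_mem_items dct hq' hkeys []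
        simp only [Function.comp_apply, hqk, beq_self_eq_true, if_true, hq2,
          List.mem_cons, true_or]
        rw [if_neg hknotin]
      · have hbk : (q.1 == k) = false := by simp [hqk]
        simp only [Function.comp_apply, hbk, Bool.false_eq_true, if_false,
          List.mem_cons, hqk, false_or]
    · have hc' : dct.contains k = false := by simpa using hc
      rw [PySem.Dict.items_insert_of_not_contains _ _ hc',
        PySem.Dict.getD_of_not_contains _ _ hc',
        List.filter_cons_of_pos (by simp [hc']),
        List.map_append, List.map_cons]
      have hmap : dct.items.map (fun q => if q.1 ∈ ks then (q.1, q.2 ++ [i]) else q)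
          = dct.items.map (fun q => if q.1 ∈ k :: ks then (q.1, q.2 ++ [i]) else q) := by
        apply List.map_congr_left
        intro q hq
        have hqk : q.1 ≠ k := by
          intro h
          have : dct.contains k = true := by
            rw [PySem.Dict.contains_iff_mem_keys, ← h]
            exact PySem.Dict.mem_keys_of_mem_items _ hq
          rw [hc'] at this
          exact Bool.false_ne_true this
        simp [List.mem_cons, hqk]
      rw [hmap]
      simp [hknotin]

lemma pvH_items (ms : List (Int × Int)) :
    (pvH ms).items = (pvKM ms).1.map (fun k => (k, pvVals ms k)) := by
  unfold pvH
  have h4 := (pvKM_inv ms).2.2.2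
  rw [PySem.Dict.items_foldl_insert_fresh (k := fun x => x) (v := fun k => pvVals ms k)]
  · simp [PySem.Dict.empty]
  · intro a _; exact PySem.Dict.contains_empty a
  · simpa using h4

lemma pvMain (ms : List (Int × Int)) : pvG ms = pvH ms := by
  induction ms using List.reverseRecOn with
  | nil => rfl
  | append_singleton ms p ih =>
    obtain ⟨h1, h2, h3, h4⟩ := pvKM_inv ms
    have hG : pvG (ms ++ [p]) = pvInnerA (pvG ms) p.1 p.2 := by
      simp [pvG, List.foldl_append]
    rw [hG, ih]
    apply PySem.Dict.ext
    have hkeysH : (pvH ms).keys = (pvKM ms).1 := by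
      simp only [PySem.Dict.keys, pvH_items, List.map_map]
      have : ((fun x : Int × List Int => x.1) ∘ fun k => (k, pvVals ms k)) = fun k => k := rfl
      rw [this]; exact List.map_id' _
    have hkeys : (pvH ms).keys.Nodup := by rw [hkeysH]; exact h4
    unfold pvInnerA
    rw [pvInsertLoop_items _ p.1 _ (pvNodup_range_neg_one _ _) hkeys]
    rw [pvH_items, pvH_items, pvKM_snoc, List.map_map]
    have hvals : ∀ k, pvVals (ms ++ [p]) k
        = pvVals ms k ++ (if k ≤ p.2 then [p.1] else []) := by
      intro k
      simp only [pvVals, List.filter_append, List.map_append]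
      congr 1
      by_cases h : k ≤ p.2 <;> simp [h]
    have hfil : (PySem.List.pyRange p.2 (-1) (-1)).filter (fun x => !(pvH ms).contains x)
        = (PySem.List.pyRange p.2 (-1) (-1)).filter (fun x => decide ((pvKM ms).2 < x)) := by
      apply List.filter_congr
      intro x hx
      rw [pvMem_range_neg_one] at hx
      rw [PySem.Dict.contains_eq_decide_mem_keys, hkeysH]
      have hiff : (x ∈ (pvKM ms).1) ↔ ¬ ((pvKM ms).2 < x) := by rw [h3]; omega
      by_cases hm : (pvKM ms).2 < x
      · simp [hiff, hm]
      · simp [hiff, hm]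
    rw [hfil]
    have hfirst : (pvKM ms).1.map
          ((fun q : Int × List Int => if q.1 ∈ PySem.List.pyRange p.2 (-1) (-1) then (q.1, q.2 ++ [p.1]) else q)
            ∘ fun k => (k, pvVals ms k))
        = (pvKM ms).1.map (fun k => (k, pvVals (ms ++ [p]) k)) := by
      apply List.map_congr_left
      intro k hk
      have hk0 : 0 ≤ k := ((h3 k).1 hk).1
      simp only [Function.comp_apply, hvals]
      by_cases hkd : k ≤ p.2
      · rw [if_pos (pvMem_range_neg_one.2 ⟨by omega, hkd⟩), if_pos hkd]
      · rw [if_neg (fun hmem => hkd (pvMem_range_neg_one.1 hmem).2), if_neg hkd]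
        simp
    rw [hfirst]
    split_ifs with hlt
    · rw [pvRange_neg_one_split (b := -1) (c := (pvKM ms).2) h1 (le_of_lt hlt),
        List.filter_append]
      have hkeep : (PySem.List.pyRange p.2 (pvKM ms).2 (-1)).filter (fun x => decide ((pvKM ms).2 < x))
          = PySem.List.pyRange p.2 (pvKM ms).2 (-1) := by
        apply List.filter_eq_self.2
        intro x hx
        rw [pvMem_range_neg_one] at hx
        simp [hx.1]
      have hdrop : (PySem.List.pyRange (pvKM ms).2 (-1) (-1)).filter (fun x => decide ((pvKM ms).2 < x))
          = [] := by
        apply List.filter_eq_nil_iff.2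
        intro x hx
        rw [pvMem_range_neg_one] at hx
        simp only [decide_eq_true_eq, not_lt]
        omega
      rw [hkeep, hdrop, List.append_nil, List.map_append]
      congr 1
      apply List.map_congr_left
      intro k hk
      rw [pvMem_range_neg_one] at hk
      have hnil : pvVals ms k = [] := by
        have hf : ms.filter (fun q => decide (k ≤ q.2)) = [] :=
          List.filter_eq_nil_iff.2 (fun q hq => by
            have := h2 q hq
            simp only [decide_eq_true_eq, not_le]
            omega)
        simp [pvVals, hf]
      rw [hvals, hnil, if_pos hk.2]
      simp
    · have hdrop : (PySem.List.pyRange p.2 (-1) (-1)).filter (fun x => decide ((pvKM ms).2 < x))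
          = [] := by
        apply List.filter_eq_nil_iff.2
        intro x hx
        rw [pvMem_range_neg_one] at hx
        simp only [decide_eq_true_eq, not_lt]
        omega
      rw [hdrop]
      simp

lemma pvCollectA (l : List (Int × Char)) :
    ∀ (d : PySem.Dict Int (List Int)) (a : Int),
    (l.foldl (fun (st : PySem.Dict Int (List Int) × Int) p =>
      if p.2 = '(' then (st.1, st.2 + 1)
      else if p.2 = ')' then (st.1, st.2 - 1)
      else if p.2 = '-' then (pvInnerA st.1 p.1 st.2, st.2)
      else st) (d, a)).1
      = (pvCollect l a).foldl (fun dd p => pvInnerA dd p.1 p.2) d := by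
  intro d a
  induction l generalizing d a with
  | nil => rfl
  | cons p l ih =>
    simp only [List.foldl_cons, pvCollect]
    split_ifs <;> (try simp only [List.foldl_cons]) <;> rw [ih]

lemma pvCollectB (l : List (Int × Char)) :
    ∀ (a : Int) (ms : List (Int × Int)),
    (l.foldl (fun (st : Int × List (Int × Int)) p =>
      if p.2 = '(' then (st.1 + 1, st.2)
      else if p.2 = ')' then (st.1 - 1, st.2)
      else if p.2 = '-' then (st.1, st.2 ++ [(p.1, st.1)])
      else st) (a, ms)).2
      = ms ++ pvCollect l a := by
  intro a ms
  induction l generalizing a ms with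
  | nil => simp [pvCollect]
  | cons p l ih =>
    simp only [List.foldl_cons, pvCollect]
    split_ifs
    all_goals rw [ih]
    all_goals try simp

-- ===== VERDICT (by name: the statement is the Claim_ definition above) =====
theorem minus_index_calc_spec : Claim_equal_minus_index_calc := by
  intro s _
  unfold Spec_minus_index_calc minus_index_calc minus_index_calc_alt
  rw [pvCollectA, pvCollectB]
  simp only [List.nil_append]
  rw [pvDedup_eq]
  exact congrArg PySem.Dict.items (pvMain (pvCollect (PySem.List.enumerate s.toList 0) 0))
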